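-- pv_equiv track=rewrite | github.com/akkerman/advent_of_code | 2016/11.py | candidate_singles_to_move
-- ===== SOURCE A (Python) =====
-- def valid_floor(floor):
--     # suppose type = 'chip'
--     # if the corresponding generator is found state could be valid
--     # if it is not found it can only be valid if no other generator is on the floor
--     for name in [tup[0] for tup in floor if tup[1] == 'chip']:
--         if (name, 'generator') in floor:
--             continue
--         if len([1 for n,t in floor if n!=name and t == 'generator']) > 0:
--             return False
--
--     return True
--
-- def candidate_singles_to_move(floor):
--     singles = []
--     for s in floor:
--         single = set()
--         single.add(s)
--         if valid_floor(floor-single):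
--             singles.append(single)
--     return singles
-- ===== SOURCE B (Python) =====
-- def candidate_singles_to_move(floor):
--     # Precompute once: generator names, chip names, and the unmatched chips.
--     # Then decide each removal in O(1) by case analysis on the removed item's
--     # type, instead of re-validating the reduced floor per item.
--     gens = {n for n, t in floor if t == 'generator'}
--     chips = {n for n, t in floor if t == 'chip'}
--     unmatched = chips - gens
--     singles = []
--     for s in floor:
--         n, t = s
--         if t == 'generator':
--             ok = gens <= {n} or (not unmatched and n not in chips)
--         elif t == 'chip':
--             ok = not gens or unmatched <= {n}
--         else:
--             ok = not gens or not unmatched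
--         if ok:
--             singles.append({s})
--     return singles
-- ===== Notes on version B (the rewrite author's own statement) =====
-- stated objective: faster
-- what changed: Instead of re-running the validity scan on floor-{s} for every item, B precomputes the generator-name set, chip-name set and unmatched-chip set once, then decides each item's removability in O(1) by case analysis on the removed item's type (generator: gens<={n} or no unmatched and n not a chip; chip: no gens or unmatched<={n}; other: no gens or no unmatched).
import Mathlib
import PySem

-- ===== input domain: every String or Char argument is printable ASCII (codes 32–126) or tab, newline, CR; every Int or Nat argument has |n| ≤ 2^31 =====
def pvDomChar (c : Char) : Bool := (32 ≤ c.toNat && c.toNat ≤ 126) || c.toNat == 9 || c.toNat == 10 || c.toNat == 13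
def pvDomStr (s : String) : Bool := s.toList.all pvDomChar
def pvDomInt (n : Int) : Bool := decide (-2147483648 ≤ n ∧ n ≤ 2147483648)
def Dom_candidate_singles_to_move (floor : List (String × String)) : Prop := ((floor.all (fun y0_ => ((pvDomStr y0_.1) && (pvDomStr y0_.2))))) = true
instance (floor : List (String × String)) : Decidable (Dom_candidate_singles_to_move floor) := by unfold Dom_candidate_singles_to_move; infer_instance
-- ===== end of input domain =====

-- B precomputes the generator/chip name sets and the unmatched chips once and
-- decides each removal in O(1) by case analysis on the removed item's type,
-- instead of re-validating floor-{s} for each item; objective: faster.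

-- ===== PORT A =====
-- the 'for name in [...]' loop of valid_floor, with its early 'return False'
def vfLoop (f : List (String × String)) : List String → Bool
  | [] => true
  | name :: rest =>
    if f.contains (name, "generator") then vfLoop f rest
    else if 0 < ((f.filter (fun p => decide (p.1 ≠ name) && decide (p.2 = "generator"))).map (fun _ => (1 : Int))).length then
      false
    else vfLoop f rest

def valid_floor (f : List (String × String)) : Bool :=
  vfLoop f ((f.filter (fun tup => tup.2 == "chip")).map (fun tup => tup.1))

def candidate_singles_to_move (floor : List (String × String)) : List (List (String × String)) :=
  floor.foldl (fun singles s =>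
    let single := PySem.Set.add PySem.Set.empty s
    if valid_floor (PySem.Set.diff floor single) then singles ++ [single] else singles) []

-- ===== PORT B =====
def candidate_singles_to_move_alt (floor : List (String × String)) : List (List (String × String)) :=
  let gens := PySem.Set.ofList ((floor.filter (fun p => p.2 == "generator")).map (fun p => p.1))
  let chips := PySem.Set.ofList ((floor.filter (fun p => p.2 == "chip")).map (fun p => p.1))
  let unmatched := PySem.Set.diff chips gens
  floor.foldl (fun singles s =>
    let ok : Bool :=
      if s.2 == "generator" then
        PySem.Set.issubset gens [s.1] || (unmatched.isEmpty && !(PySem.Set.contains chips s.1))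
      else if s.2 == "chip" then
        gens.isEmpty || PySem.Set.issubset unmatched [s.1]
      else
        gens.isEmpty || unmatched.isEmpty
    if ok then singles ++ [[s]] else singles) []

-- ===== PRECONDITION & SPEC =====
def Spec_candidate_singles_to_move (floor : List (String × String)) (out : List (List (String × String))) : Prop := out = candidate_singles_to_move_alt floor
instance (floor : List (String × String)) (out : List (List (String × String))) : Decidable (Spec_candidate_singles_to_move floor out) := by unfold Spec_candidate_singles_to_move; infer_instance

-- ===== CLAIM (what is proved, stated in full; the proofs are below) =====
def Claim_equal_candidate_singles_to_move : Prop := ∀ (floor : List (String × String)), Dom_candidate_singles_to_move floor → Spec_candidate_singles_to_move floor (candidate_singles_to_move floor)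

-- ===== LEMMAS AND PROOFS =====

lemma vfCond_iff (f : List (String × String)) (name : String) :
    (0 < ((f.filter (fun p => decide (p.1 ≠ name) && decide (p.2 = "generator"))).map (fun _ => (1 : Int))).length) ↔
      ∃ p ∈ f, p.1 ≠ name ∧ p.2 = "generator" := by
  simp only [List.length_map, List.length_pos_iff_exists_mem, List.mem_filter,
    Bool.and_eq_true, decide_eq_true_eq]

-- what vfLoop's early-return loop decides
lemma vfLoop_iff (f : List (String × String)) (names : List String) :
    vfLoop f names = true ↔
      ∀ name ∈ names, (name, "generator") ∈ f ∨
        ¬ ∃ p ∈ f, p.1 ≠ name ∧ p.2 = "generator" := by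
  induction names with
  | nil => simp [vfLoop]
  | cons name rest ih =>
    simp only [vfLoop]
    split_ifs with h1 h2
    · simp only [ih, List.mem_cons]
      constructor
      · rintro h n (rfl | hn)
        · exact Or.inl (by simpa using h1)
        · exact h n hn
      · intro h n hn; exact h n (Or.inr hn)
    · simp only [false_iff]
      intro h
      rcases h name (List.mem_cons_self ..) with hg | hng
      · exact h1 (by simpa using hg)
      · exact hng ((vfCond_iff f name).mp h2)
    · simp only [ih, List.mem_cons]
      constructor
      · rintro h n (rfl | hn)
        · right
          intro hex
          exact h2 ((vfCond_iff f n).mpr hex)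
        · exact h n hn
      · intro h n hn; exact h n (Or.inr hn)

-- A's validity test, as a proposition about memberships
lemma valid_floor_iff (f : List (String × String)) :
    valid_floor f = true ↔
      ((∀ p ∈ f, p.2 ≠ "generator") ∨ ∀ n, (n, "chip") ∈ f → (n, "generator") ∈ f) := by
  have hA : valid_floor f = true ↔
      ∀ name, (name, "chip") ∈ f → ((name, "generator") ∈ f ∨
        ¬ ∃ p ∈ f, p.1 ≠ name ∧ p.2 = "generator") := by
    rw [valid_floor, vfLoop_iff]
    constructor
    · intro h name hname
      exact h name (by simp only [List.mem_map, List.mem_filter]; exact ⟨(name, "chip"), ⟨hname, by simp⟩, rfl⟩)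
    · intro h name hname
      simp only [List.mem_map, List.mem_filter, beq_iff_eq] at hname
      obtain ⟨p, ⟨hpf, hp2⟩, hp1⟩ := hname
      have hp : p = (name, "chip") := by obtain ⟨x, y⟩ := p; simp_all
      exact h name (hp ▸ hpf)
  rw [hA]
  constructor
  · intro h
    by_cases hg : ∃ p ∈ f, p.2 = "generator"
    · right
      intro n hn
      rcases h n hn with h1 | h2
      · exact h1
      · obtain ⟨q, hqf, hq2⟩ := hg
        have hq1 : q.1 = n := by
          by_contra hne
          exact h2 ⟨q, hqf, hne, hq2⟩
        have hq : q = (n, "generator") := by obtain ⟨x, y⟩ := q; simp_all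
        exact hq ▸ hqf
    · left
      intro p hpf hp2
      exact hg ⟨p, hpf, hp2⟩
  · rintro (hg | hsub)
    · intro name _
      right
      rintro ⟨p, hpf, _, hp2⟩
      exact hg p hpf hp2
    · intro name hname
      exact Or.inl (hsub name hname)

-- membership in the generator/chip name sets B builds
lemma mem_nameSet (floor : List (String × String)) (t n : String) :
    n ∈ PySem.Set.ofList ((floor.filter (fun p => p.2 == t)).map (fun p => p.1)) ↔
      (n, t) ∈ floor := by
  simp only [PySem.Set.mem_ofList, List.mem_map, List.mem_filter, beq_iff_eq]
  constructor
  · rintro ⟨p, ⟨hpf, hp2⟩, hp1⟩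
    have hp : p = (n, t) := by obtain ⟨x, y⟩ := p; simp_all
    exact hp ▸ hpf
  · intro h
    exact ⟨(n, t), ⟨h, rfl⟩, rfl⟩

-- B's O(1) per-item test equals A's validity of floor - {s}
lemma per_item_eq (floor : List (String × String)) (s : String × String) :
    (if s.2 == "generator" then
        PySem.Set.issubset (PySem.Set.ofList ((floor.filter (fun p => p.2 == "generator")).map (fun p => p.1))) [s.1] ||
          ((PySem.Set.diff (PySem.Set.ofList ((floor.filter (fun p => p.2 == "chip")).map (fun p => p.1)))
              (PySem.Set.ofList ((floor.filter (fun p => p.2 == "generator")).map (fun p => p.1)))).isEmpty &&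
            !(PySem.Set.contains (PySem.Set.ofList ((floor.filter (fun p => p.2 == "chip")).map (fun p => p.1))) s.1))
      else if s.2 == "chip" then
        (PySem.Set.ofList ((floor.filter (fun p => p.2 == "generator")).map (fun p => p.1))).isEmpty ||
          PySem.Set.issubset (PySem.Set.diff (PySem.Set.ofList ((floor.filter (fun p => p.2 == "chip")).map (fun p => p.1)))
            (PySem.Set.ofList ((floor.filter (fun p => p.2 == "generator")).map (fun p => p.1)))) [s.1]
      else
        (PySem.Set.ofList ((floor.filter (fun p => p.2 == "generator")).map (fun p => p.1))).isEmpty ||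
          (PySem.Set.diff (PySem.Set.ofList ((floor.filter (fun p => p.2 == "chip")).map (fun p => p.1)))
            (PySem.Set.ofList ((floor.filter (fun p => p.2 == "generator")).map (fun p => p.1)))).isEmpty) =
    valid_floor (PySem.Set.diff floor (PySem.Set.add PySem.Set.empty s)) := by
  obtain ⟨m, t⟩ := s
  have hadd : PySem.Set.add PySem.Set.empty (m, t) = [(m, t)] := rfl
  rw [hadd]
  set G := PySem.Set.ofList ((floor.filter (fun p => p.2 == "generator")).map (fun p => p.1)) with hG
  set C := PySem.Set.ofList ((floor.filter (fun p => p.2 == "chip")).map (fun p => p.1)) with hC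
  have hGm : ∀ n, n ∈ G ↔ (n, "generator") ∈ floor := fun n => hG ▸ mem_nameSet floor _ n
  have hCm : ∀ n, n ∈ C ↔ (n, "chip") ∈ floor := fun n => hC ▸ mem_nameSet floor _ n
  have hmemf : ∀ p : String × String,
      p ∈ PySem.Set.diff floor [(m, t)] ↔ p ∈ floor ∧ p ≠ (m, t) := by
    intro p; simp [PySem.Set.mem_diff]
  -- Prop forms of the Bool pieces
  have hGe : G.isEmpty = true ↔ ∀ n, (n, "generator") ∉ floor := by
    rw [List.isEmpty_iff, List.eq_nil_iff_forall_not_mem]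
    exact ⟨fun h n hn => h n ((hGm n).mpr hn), fun h n hn => h n ((hGm n).mp hn)⟩
  have hUmem : ∀ n, n ∈ PySem.Set.diff C G ↔ ((n, "chip") ∈ floor ∧ (n, "generator") ∉ floor) := by
    intro n
    rw [PySem.Set.mem_diff, hGm, hCm]
  have hUe : (PySem.Set.diff C G).isEmpty = true ↔
      ∀ n, (n, "chip") ∈ floor → (n, "generator") ∈ floor := by
    rw [List.isEmpty_iff, List.eq_nil_iff_forall_not_mem]
    constructor
    · intro h n hn
      by_contra hg
      exact h n ((hUmem n).mpr ⟨hn, hg⟩)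
    · intro h n hn
      obtain ⟨h1, h2⟩ := (hUmem n).mp hn
      exact h2 (h n h1)
  have hUsub : PySem.Set.issubset (PySem.Set.diff C G) [m] = true ↔
      ∀ n, (n, "chip") ∈ floor → n ≠ m → (n, "generator") ∈ floor := by
    rw [PySem.Set.issubset_iff]
    constructor
    · intro h n hc hne
      by_contra hg
      exact hne (by simpa using h n ((hUmem n).mpr ⟨hc, hg⟩))
    · intro h n hn
      obtain ⟨h1, h2⟩ := (hUmem n).mp hn
      simp only [List.mem_singleton]
      by_contra hne
      exact h2 (h n h1 hne)
  have hGsub : PySem.Set.issubset G [m] = true ↔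
      ∀ n, (n, "generator") ∈ floor → n = m := by
    rw [PySem.Set.issubset_iff]
    exact ⟨fun h n hn => by simpa using h n ((hGm n).mpr hn),
      fun h n hn => by simpa using h n ((hGm n).mp hn)⟩
  have hCc : PySem.Set.contains C m = true ↔ (m, "chip") ∈ floor := by
    rw [PySem.Set.contains_iff, hCm]
  -- the RHS as a proposition
  have hRHS := valid_floor_iff (PySem.Set.diff floor [(m, t)])
  apply Bool.coe_iff_coe.mp
  rw [hRHS]
  by_cases ht : t = "generator"
  · subst ht
    simp only [if_pos (by simp : (("generator" : String) == "generator") = true)]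
    simp only [Bool.or_eq_true, Bool.and_eq_true, Bool.not_eq_true', hGsub, hUe]
    constructor
    · rintro (hsub | ⟨hU, hmc⟩)
      · left
        rintro p hp hp2
        obtain ⟨hpf, hpne⟩ := (hmemf p).mp hp
        obtain ⟨n, tt⟩ := p
        simp only at hp2
        subst hp2
        exact hpne (by rw [hsub n hpf])
      · right
        intro n hn
        obtain ⟨hnf, hnne⟩ := (hmemf _).mp hn
        have hnm : n ≠ m := by
          rintro rfl
          exact absurd (hCc.mpr hnf) (Bool.eq_false_iff.mp hmc)
        exact (hmemf _).mpr ⟨hU n hnf, by simp [hnm]⟩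
    · rintro (hnog | hmatch)
      · left
        intro n hn
        by_contra hne
        exact hnog (n, "generator") ((hmemf _).mpr ⟨hn, by simp [hne]⟩) rfl
      · right
        have hmc : (m, "chip") ∉ floor := by
          intro hmcf
          have := hmatch m ((hmemf _).mpr ⟨hmcf, by simp⟩)
          exact absurd ((hmemf _).mp this).2 (by simp)
        refine ⟨fun n hn => ?_, by simpa using fun h => hmc (hCc.mp h)⟩
        have hnm : n ≠ m := fun h => hmc (h ▸ hn)
        have := hmatch n ((hmemf _).mpr ⟨hn, by simp [hnm]⟩)
        exact ((hmemf _).mp this).1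
  · rw [if_neg (by simpa using ht)]
    -- generators and their membership in f are unchanged when t ≠ "generator"
    have hgenf : ∀ n, (n, "generator") ∈ PySem.Set.diff floor [(m, t)] ↔ (n, "generator") ∈ floor := by
      intro n
      rw [hmemf]
      constructor
      · exact fun h => h.1
      · intro h
        exact ⟨h, fun hc => ht ((Prod.ext_iff.mp hc).2.symm)⟩
    by_cases htc : t = "chip"
    · subst htc
      simp only [if_pos (by simp : (("chip" : String) == "chip") = true)]
      simp only [Bool.or_eq_true, hGe, hUsub]
      have hchipf : ∀ n, (n, "chip") ∈ PySem.Set.diff floor [(m, "chip")] ↔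
          ((n, "chip") ∈ floor ∧ n ≠ m) := by
        intro n
        rw [hmemf]
        constructor
        · rintro ⟨h1, h2⟩
          exact ⟨h1, fun h => h2 (by rw [h])⟩
        · rintro ⟨h1, h2⟩
          exact ⟨h1, fun h => h2 ((Prod.ext_iff.mp h).1)⟩
      constructor
      · rintro (hnog | hsub)
        · left
          rintro p hp hp2
          obtain ⟨n, tt⟩ := p
          simp only at hp2
          subst hp2
          exact hnog n ((hgenf n).mp hp)
        · right
          intro n hn
          obtain ⟨h1, h2⟩ := (hchipf n).mp hn
          exact (hgenf n).mpr (hsub n h1 h2)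
      · rintro (hnog | hmatch)
        · left
          intro n hn
          exact hnog (n, "generator") ((hgenf n).mpr hn) rfl
        · right
          intro n hc hnm
          exact (hgenf n).mp (hmatch n ((hchipf n).mpr ⟨hc, hnm⟩))
    · rw [if_neg (by simpa using htc)]
      simp only [Bool.or_eq_true, hGe, hUe]
      have hchipf : ∀ n, (n, "chip") ∈ PySem.Set.diff floor [(m, t)] ↔ (n, "chip") ∈ floor := by
        intro n
        rw [hmemf]
        constructor
        · exact fun h => h.1
        · intro h
          exact ⟨h, fun hc => htc ((Prod.ext_iff.mp hc).2.symm)⟩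
      constructor
      · rintro (hnog | hU)
        · left
          rintro p hp hp2
          obtain ⟨n, tt⟩ := p
          simp only at hp2
          subst hp2
          exact hnog n ((hgenf n).mp hp)
        · right
          intro n hn
          exact (hgenf n).mpr (hU n ((hchipf n).mp hn))
      · rintro (hnog | hmatch)
        · left
          intro n hn
          exact hnog (n, "generator") ((hgenf n).mpr hn) rfl
        · right
          intro n hc
          exact (hgenf n).mp (hmatch n ((hchipf n).mpr hc))

-- ===== VERDICT (by name: the statement is the Claim_ definition above) =====
theorem candidate_singles_to_move_spec : Claim_equal_candidate_singles_to_move := by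
  intro floor _
  unfold Spec_candidate_singles_to_move
  simp only [candidate_singles_to_move, candidate_singles_to_move_alt]
  congr 1
  funext singles s
  rw [← per_item_eq floor s]
  rfl
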